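-- pv_equiv track=rewrite | github.com/ChenF221/Teoria-de-la-computacion | Bloque_2/expresion_regular/re.py | validar_cadena
-- ===== SOURCE A (Python) =====
-- def validar_cadena(cadena):
--     # Si la cadena cumple con la estructura (0 + 10)*(ε + 1)
--
--     # Etapa 1: Verificar patrones (0 + 10)*
--     i = 0
--     contador = 0  # Contador para la longitud de la cadena
--     for char in cadena:
--         contador += 1  # Incrementar el contador en cada iteración
--
--     while i < contador:
--         if cadena[i] == '0':
--             i += 1  # Pasar '0'
--         elif i + 1 < contador and cadena[i] == '1' and cadena[i + 1] == '0':
--             i += 2  # Pasar '10'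
--         else:
--             break  # Salir si no hay '0' o '10'
--
--     # Etapa 2: Verificar que termine en ε o '1'
--     return i == contador or (i == contador - 1 and cadena[i] == '1')
-- ===== SOURCE B (Python) =====
-- def validar_cadena(cadena):
--     # DFA for (0 + 10)*(eps + 1): state False = start/after-0 (accepting),
--     # True = just saw a lone '1' (accepting, only '0' may follow).
--     pending1 = False
--     for c in cadena:
--         if pending1:
--             if c != '0':
--                 return False
--             pending1 = False
--         else:
--             if c == '0':
--                 pending1 = False
--             elif c == '1':
--                 pending1 = True
--             else:
--                 return False
--     return True
-- ===== Notes on version B (the rewrite author's own statement) =====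
-- stated objective: simpler
-- what changed: Replaced A's manual length-count loop plus greedy two-character index-advance while-loop by a single-pass two-state DFA over the characters with early False return.
import Mathlib
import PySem

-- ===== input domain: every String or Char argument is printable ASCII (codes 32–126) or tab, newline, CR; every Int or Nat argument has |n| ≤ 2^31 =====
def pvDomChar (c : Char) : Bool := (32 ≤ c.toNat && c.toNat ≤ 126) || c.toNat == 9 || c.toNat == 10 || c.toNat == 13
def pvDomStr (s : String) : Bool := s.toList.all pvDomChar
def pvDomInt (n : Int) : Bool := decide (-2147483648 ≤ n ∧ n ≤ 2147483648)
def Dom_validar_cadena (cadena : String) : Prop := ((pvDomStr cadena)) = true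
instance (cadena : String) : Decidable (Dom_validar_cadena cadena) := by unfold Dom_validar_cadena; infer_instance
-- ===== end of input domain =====

-- B replaces A's length count and greedy two-character index-advance loop by a
-- single-pass two-state DFA over the characters (objective: simpler).


-- ===== PORT A =====
-- A's while loop: index i advances by 1 past '0', by 2 past '10', else stops.
def vcLoopA (l : List Char) (n i : Nat) : Nat :=
  if i < n then
    if l.getD i ' ' = '0' then vcLoopA l n (i + 1)
    else if i + 1 < n ∧ l.getD i ' ' = '1' ∧ l.getD (i + 1) ' ' = '0' then vcLoopA l n (i + 2)
    else i
  else i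
termination_by n - i

def validar_cadena (cadena : String) : Bool :=
  let l := cadena.toList
  -- contador: counted with a for-loop in A
  let contador := l.foldl (fun acc _ => acc + 1) 0
  let i := vcLoopA l contador 0
  decide (i = contador) || (decide (i = contador - 1) && decide (l.getD i ' ' = '1'))

-- ===== PORT B =====
-- B's DFA: state `pending1` = just saw a lone '1'; early `return False` → result false.
def vcRun (l : List Char) (pending1 : Bool) : Bool :=
  match l with
  | [] => true
  | c :: rest =>
    if pending1 then
      if c ≠ '0' then false else vcRun rest false
    else
      if c = '0' then vcRun rest false
      else if c = '1' then vcRun rest true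
      else false

def validar_cadena_alt (cadena : String) : Bool := vcRun cadena.toList false

-- ===== PRECONDITION & SPEC =====
def Spec_validar_cadena (cadena : String) (out : Bool) : Prop := out = validar_cadena_alt cadena
instance (cadena : String) (out : Bool) : Decidable (Spec_validar_cadena cadena out) := by unfold Spec_validar_cadena; infer_instance

-- ===== CLAIM (what is proved, stated in full; the proofs are below) =====
def Claim_equal_validar_cadena : Prop := ∀ (cadena : String), Dom_validar_cadena cadena → Spec_validar_cadena cadena (validar_cadena cadena)

-- ===== LEMMAS AND PROOFS =====

theorem vc_foldl_count (l : List Char) (a : Nat) :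
    l.foldl (fun acc _ => acc + 1) a = a + l.length := by
  induction l generalizing a with
  | nil => simp
  | cons c t ih => simp [List.foldl, ih]; omega

theorem vc_getD_of_drop {l : List Char} {i : Nat} {c : Char} {rest : List Char}
    (h : l.drop i = c :: rest) : l.getD i ' ' = c := by
  have h0 : (l.drop i)[0]? = l[i]? := by
    simp [List.getElem?_drop]
  rw [h] at h0
  simp at h0
  simp [List.getD, h0.symm]

theorem vc_drop_succ {l : List Char} {i : Nat} {c : Char} {rest : List Char}
    (h : l.drop i = c :: rest) : l.drop (i + 1) = rest := by
  have : l.drop (i + 1) = (l.drop i).drop 1 := by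
    rw [List.drop_drop]
  rw [this, h]; rfl

theorem vc_lt_of_drop {l : List Char} {i : Nat} {c : Char} {rest : List Char}
    (h : l.drop i = c :: rest) : i < l.length := by
  by_contra hn
  rw [List.drop_eq_nil_of_le (by omega)] at h
  exact absurd h (by simp)

-- main invariant: A's loop-then-check from position i equals B's DFA on the suffix
theorem vc_main (k : Nat) : ∀ (l : List Char) (i : Nat), i ≤ l.length → l.length - i ≤ k →
    (decide (vcLoopA l l.length i = l.length) ||
      (decide (vcLoopA l l.length i = l.length - 1) &&
        decide (l.getD (vcLoopA l l.length i) ' ' = '1')))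
      = vcRun (l.drop i) false := by
  induction k with
  | zero =>
    intro l i hi hk
    have hin : i = l.length := by omega
    subst hin
    rw [List.drop_length, vcLoopA]
    simp [vcRun]
  | succ k ih =>
    intro l i hi hk
    by_cases hlt : i < l.length
    case neg =>
      have hin : i = l.length := by omega
      subst hin
      rw [List.drop_length, vcLoopA]
      simp [vcRun]
    case pos =>
    obtain ⟨c, rest, hd⟩ : ∃ c rest, l.drop i = c :: rest := by
      cases hdrop : l.drop i with
      | nil => exact absurd (List.drop_eq_nil_iff.mp hdrop) (by omega)
      | cons c rest => exact ⟨c, rest, rfl⟩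
    have hg : l.getD i ' ' = c := vc_getD_of_drop hd
    have hd1 : l.drop (i + 1) = rest := vc_drop_succ hd
    by_cases h0 : c = '0'
    · rw [vcLoopA, if_pos hlt, if_pos (by rw [hg, h0])]
      rw [ih l (i + 1) (by omega) (by omega), hd1, hd, h0]
      simp [vcRun]
    · by_cases h1 : c = '1'
      · by_cases h10 : i + 1 < l.length ∧ l.getD (i + 1) ' ' = '0'
        · obtain ⟨hlt1, hz⟩ := h10
          obtain ⟨d, rest', hd'⟩ : ∃ d rest', rest = d :: rest' := by
            cases hr : rest with
            | nil =>
              rw [hr] at hd1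
              exact absurd (List.drop_eq_nil_iff.mp hd1) (by omega)
            | cons d rest' => exact ⟨d, rest', rfl⟩
          have hdval : d = '0' := by
            rw [hd'] at hd1
            have := vc_getD_of_drop hd1
            rw [hz] at this; exact this.symm
          rw [vcLoopA, if_pos hlt, if_neg (by rw [hg, h1]; decide),
              if_pos ⟨hlt1, by rw [hg, h1], hz⟩]
          have hd2 : l.drop (i + 2) = rest' := by
            rw [hd'] at hd1
            exact vc_drop_succ hd1
          rw [ih l (i + 2) (by omega) (by omega), hd2, hd, hd', h1, hdval]
          simp [vcRun]
        · -- loop stops at i with cadena[i] = '1'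
          rw [vcLoopA, if_pos hlt, if_neg (by rw [hg, h1]; decide),
              if_neg (by intro ⟨ha, _, hb⟩; exact h10 ⟨ha, hb⟩)]
          rw [hd, h1]
          cases hr : rest with
          | nil =>
            have hi1 : i = l.length - 1 := by
              rw [hr] at hd1
              have := List.drop_eq_nil_iff.mp hd1
              omega
            simp [vcRun, hi1]
            right
            simp only [List.getD] at hg
            rw [hi1] at hg
            rw [hg, h1]
          | cons d rest' =>
            rw [hr] at hd1
            have hdne : d ≠ '0' := by
              intro hc
              apply h10
              refine ⟨vc_lt_of_drop hd1, ?_⟩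
              rw [vc_getD_of_drop hd1, hc]
            have hine : i ≠ l.length - 1 := by
              have := vc_lt_of_drop hd1
              omega
            simp [vcRun, hdne, hine]
            omega
      · -- c is neither '0' nor '1': loop stops, both false
        rw [vcLoopA, if_pos hlt, if_neg (by rw [hg]; exact h0),
            if_neg (by intro ⟨_, hb, _⟩; rw [hg] at hb; exact h1 hb)]
        rw [hd]
        simp [vcRun, h0, h1]
        refine ⟨by omega, fun _ => ?_⟩
        simp only [List.getD] at hg
        rw [hg]
        exact h1

-- ===== VERDICT (by name: the statement is the Claim_ definition above) =====
theorem validar_cadena_spec : Claim_equal_validar_cadena := by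
  intro cadena _
  unfold Spec_validar_cadena validar_cadena validar_cadena_alt
  simp only [vc_foldl_count, Nat.zero_add]
  have := vc_main cadena.toList.length cadena.toList 0 (Nat.zero_le _) (by omega)
  rw [List.drop_zero] at this
  exact this
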